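-- pv_equiv track=rewrite | github.com/llax19/KVcache | kvcachepolicy/s3_fifo_attn.py | _compute_request_offsets
-- ===== SOURCE A (Python) =====
-- from typing import Dict, List, Optional
--
-- def _compute_request_offsets(seq: List[int]) -> Dict[int, int]:
--     """
--     Split seq into contiguous runs (x[i] == x[i-1]+1).
--     The last run gets offset 0, the previous run gets 1, etc.
--     Example:
--       seq = [1,15,16,...,27,3869,3870]
--       runs = [[1],[15..27],[3869,3870]]
--       offsets: {1:2, 15..27:1, 3869..3870:0}
--     """
--     if not seq:
--         return {}
--     runs: List[List[int]] = []
--     cur = [seq[0]]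
--     for i in range(1, len(seq)):
--         if seq[i] == seq[i - 1] + 1:
--             cur.append(seq[i])
--         else:
--             runs.append(cur)
--             cur = [seq[i]]
--     runs.append(cur)
--
--     out: Dict[int, int] = {}
--     for idx, run in enumerate(runs):
--         off = len(runs) - 1 - idx  # last run -> 0
--         for x in run:
--             out[x] = off
--     return out
-- ===== SOURCE B (Python) =====
-- from typing import Dict, List
--
-- def _compute_request_offsets(seq: List[int]) -> Dict[int, int]:
--     # Single forward pass with a running offset counter: count run boundaries
--     # once, then decrement at each boundary -- no intermediate list of runs.
--     if not seq:
--         return {}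
--     off = sum(1 for i in range(1, len(seq)) if seq[i] != seq[i - 1] + 1)
--     out = {seq[0]: off}
--     for i in range(1, len(seq)):
--         if seq[i] != seq[i - 1] + 1:
--             off -= 1
--         out[seq[i]] = off
--     return out
-- ===== Notes on version B (the rewrite author's own statement) =====
-- stated objective: simpler
-- what changed: Replaces A's two-phase run-list construction (build a list of runs, then enumerate it to assign len(runs)-1-idx) with a single forward pass keeping only a running offset counter: boundaries are counted once, then the counter is decremented at each run boundary while offsets are assigned.
import Mathlib
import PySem

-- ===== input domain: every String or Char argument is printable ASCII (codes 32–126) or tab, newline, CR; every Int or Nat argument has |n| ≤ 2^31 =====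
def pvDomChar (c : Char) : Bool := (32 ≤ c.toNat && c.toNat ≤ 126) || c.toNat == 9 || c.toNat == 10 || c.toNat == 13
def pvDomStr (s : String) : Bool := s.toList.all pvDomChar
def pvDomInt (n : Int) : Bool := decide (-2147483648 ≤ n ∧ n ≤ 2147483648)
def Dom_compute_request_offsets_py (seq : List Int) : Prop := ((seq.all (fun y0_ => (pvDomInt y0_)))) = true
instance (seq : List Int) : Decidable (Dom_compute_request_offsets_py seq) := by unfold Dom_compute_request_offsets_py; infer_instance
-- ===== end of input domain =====

-- B replaces A's run-list + enumerate phase by one forward pass with a running offset counter (objective: simpler).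

-- ===== PORT A =====
-- the 'for i in range(1, len(seq))' loop; 'prev' is seq[i-1] (always in range), 'rest' the
-- remaining seq[i..]; exact because the loop only reads seq[i] and seq[i-1].
def pvRunsA (prev : Int) (rest : List Int) (cur : List Int) (runs : List (List Int)) :
    List (List Int) :=
  match rest with
  | [] => runs ++ [cur]
  | x :: xs =>
    if x = prev + 1 then pvRunsA x xs (cur ++ [x]) runs
    else pvRunsA x xs [x] (runs ++ [cur])

def compute_request_offsets_py (seq : List Int) : List (Int × Int) :=
  match seq with
  | [] => []
  | h :: t =>
    let runs := pvRunsA h t [h] []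
    let out : PySem.Dict Int Int :=
      (PySem.List.enumerate runs 0).foldl
        (fun out p =>
          let off := (runs.length : Int) - 1 - p.1
          p.2.foldl (fun out x => out.insert x off) out)
        PySem.Dict.empty
    out.items

-- ===== PORT B =====
-- 'sum(1 for i in range(1,len(seq)) if seq[i] != seq[i-1]+1)', same prev-pairing transcription
def pvCountB (prev : Int) (rest : List Int) : Int :=
  match rest with
  | [] => 0
  | x :: xs => (if x ≠ prev + 1 then 1 else 0) + pvCountB x xs

-- the assignment loop of B, carrying the mutable 'off' and dict 'out'
def pvFillB (prev : Int) (rest : List Int) (off : Int) (out : PySem.Dict Int Int) :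
    PySem.Dict Int Int :=
  match rest with
  | [] => out
  | x :: xs =>
    let off' := if x ≠ prev + 1 then off - 1 else off
    pvFillB x xs off' (out.insert x off')

def compute_request_offsets_py_alt (seq : List Int) : List (Int × Int) :=
  match seq with
  | [] => []
  | h :: t =>
    let off := pvCountB h t
    (pvFillB h t off (PySem.Dict.empty.insert h off)).items

-- ===== PRECONDITION & SPEC =====
def Spec_compute_request_offsets_py (seq : List Int) (out : List (Int × Int)) : Prop := out = compute_request_offsets_py_alt seq
instance (seq : List Int) (out : List (Int × Int)) : Decidable (Spec_compute_request_offsets_py seq out) := by unfold Spec_compute_request_offsets_py; infer_instance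

-- ===== CLAIM (what is proved, stated in full; the proofs are below) =====
def Claim_equal_compute_request_offsets_py : Prop := ∀ (seq : List Int), Dom_compute_request_offsets_py seq → Spec_compute_request_offsets_py seq (compute_request_offsets_py seq)

-- ===== LEMMAS AND PROOFS =====

-- the (key, value) insertion sequence A performs: run j of 'runs' gets value k - j
def pvF (k : Int) (runs : List (List Int)) : List (Int × Int) :=
  match runs with
  | [] => []
  | r :: rs => r.map (fun x => (x, k)) ++ pvF (k - 1) rs

-- the (key, value) insertion sequence B performs after the first element
def pvPairsB (prev : Int) (rest : List Int) (off : Int) : List (Int × Int) :=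
  match rest with
  | [] => []
  | x :: xs =>
    let off' := if x ≠ prev + 1 then off - 1 else off
    (x, off') :: pvPairsB x xs off'

def pvIns (out : PySem.Dict Int Int) (ps : List (Int × Int)) : PySem.Dict Int Int :=
  ps.foldl (fun d p => d.insert p.1 p.2) out

theorem pvRunsA_acc (prev : Int) (rest : List Int) (cur : List Int) (runs : List (List Int)) :
    pvRunsA prev rest cur runs = runs ++ pvRunsA prev rest cur [] := by
  induction rest generalizing prev cur runs with
  | nil => simp [pvRunsA]
  | cons x xs ih =>
    rw [pvRunsA]
    conv_rhs => rw [pvRunsA]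
    by_cases h : x = prev + 1
    · simp only [if_pos h]
      exact ih x (cur ++ [x]) runs
    · simp only [if_neg h, List.nil_append]
      rw [ih x [x] (runs ++ [cur]), ih x [x] [cur]]
      simp

theorem pvRunsA_length (prev : Int) (rest : List Int) (cur : List Int) :
    ((pvRunsA prev rest cur []).length : Int) = 1 + pvCountB prev rest := by
  induction rest generalizing prev cur with
  | nil => simp [pvRunsA, pvCountB]
  | cons x xs ih =>
    rw [pvRunsA, pvCountB]
    by_cases h : x = prev + 1
    · subst h
      rw [if_pos rfl]
      simp only [ne_eq, not_true_eq_false, if_false]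
      rw [ih]
      ring
    · rw [if_neg h, pvRunsA_acc, List.nil_append, List.length_append]
      simp only [ne_eq, h, not_false_eq_true, if_true, List.length_cons, List.length_nil]
      push_cast
      rw [ih x [x]]

-- main correspondence between A's insertion pairs and B's
theorem pvF_runs (prev : Int) (rest : List Int) (cur : List Int) :
    pvF (pvCountB prev rest) (pvRunsA prev rest cur []) =
      cur.map (fun x => (x, pvCountB prev rest)) ++ pvPairsB prev rest (pvCountB prev rest) := by
  induction rest generalizing prev cur with
  | nil => simp [pvRunsA, pvCountB, pvF, pvPairsB]
  | cons x xs ih =>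
    rw [pvRunsA]
    by_cases h : x = prev + 1
    · rw [if_pos h]
      have hc : pvCountB prev (x :: xs) = pvCountB x xs := by simp [pvCountB, h]
      rw [hc, ih x (cur ++ [x]), pvPairsB]
      simp [h]
    · rw [if_neg h]
      have hc : pvCountB prev (x :: xs) = 1 + pvCountB x xs := by simp [pvCountB, h]
      rw [hc, pvRunsA_acc, List.nil_append]
      show pvF (1 + pvCountB x xs) ([cur] ++ pvRunsA x xs [x] []) = _
      rw [List.singleton_append, pvF]
      have h1 : 1 + pvCountB x xs - 1 = pvCountB x xs := by ring
      rw [h1, ih x [x], pvPairsB]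
      simp [h, h1]

theorem pvIns_append (out : PySem.Dict Int Int) (ps qs : List (Int × Int)) :
    pvIns out (ps ++ qs) = pvIns (pvIns out ps) qs := by
  simp [pvIns, List.foldl_append]

theorem pvIns_map_run (out : PySem.Dict Int Int) (r : List Int) (off : Int) :
    r.foldl (fun out x => out.insert x off) out = pvIns out (r.map (fun x => (x, off))) := by
  induction r generalizing out with
  | nil => simp [pvIns]
  | cons x xs ih => simp [pvIns, List.foldl] at *; rw [ih]

-- A's enumerate-fold equals pvIns of pvF, for any start index j
theorem pvA_fold (runs : List (List Int)) (n j : Int) (out : PySem.Dict Int Int) :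
    (PySem.List.enumerate runs j).foldl
        (fun out p =>
          let off := n - 1 - p.1
          p.2.foldl (fun out x => out.insert x off) out) out
      = pvIns out (pvF (n - 1 - j) runs) := by
  induction runs generalizing j out with
  | nil => simp [PySem.List.enumerate_nil, pvF, pvIns]
  | cons r rs ih =>
    rw [PySem.List.enumerate_cons, List.foldl_cons, pvF, pvIns_append, ih]
    rw [pvIns_map_run]
    congr 2
    ring

theorem pvB_fold (prev : Int) (rest : List Int) (off : Int) (out : PySem.Dict Int Int) :
    pvFillB prev rest off out = pvIns out (pvPairsB prev rest off) := by
  induction rest generalizing prev off out with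
  | nil => simp [pvFillB, pvPairsB, pvIns]
  | cons x xs ih => rw [pvFillB, pvPairsB, ih]; simp [pvIns]

-- ===== VERDICT (by name: the statement is the Claim_ definition above) =====
theorem compute_request_offsets_py_spec : Claim_equal_compute_request_offsets_py := by
  intro seq _
  unfold Spec_compute_request_offsets_py
  cases seq with
  | nil => rfl
  | cons h t =>
    unfold compute_request_offsets_py compute_request_offsets_py_alt
    simp only
    rw [pvA_fold, pvB_fold]
    congr 1
    have hn : ((pvRunsA h t [h] []).length : Int) - 1 - 0 = pvCountB h t := by
      rw [pvRunsA_length]; ring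
    rw [hn, pvF_runs h t [h]]
    simp [pvIns, List.map]
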